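-- pv_equiv track=rewrite | github.com/owYuriGG/Laboratorio-de-Altoritmos-2 | semana02/ExerciciosParaEntregar/listaDuplicada.py | organizator
-- ===== SOURCE A (Python) =====
-- def organizator(list):
--     duplicated_itens = []
--     normal_list = []
--     for i in list:
--         counter = 0
--         for i2 in list:
--             if i2 == i:
--                 counter += 1
--         if counter >= 2:
--             if i not in duplicated_itens:
--                 duplicated_itens.append(i)
--                 normal_list.append(i)
--         elif counter <= 1:
--             normal_list.append(i)
--     return duplicated_itens, normal_list
-- ===== SOURCE B (Python) =====
-- def organizator(list):
--     counts = {}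
--     for x in list:
--         counts[x] = counts.get(x, 0) + 1
--     duplicated_itens = [k for k, v in counts.items() if v >= 2]
--     normal_list = [*counts]
--     return duplicated_itens, normal_list
-- ===== Notes on version B (the rewrite author's own statement) =====
-- stated objective: faster
-- what changed: Replaced the quadratic positional loop with coupled appends by one counting-dict pass followed by two independent derivations: normal_list is the dict's keys (order-preserving dedup) and duplicated_itens filters the dict's items by count >= 2.
import Mathlib
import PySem

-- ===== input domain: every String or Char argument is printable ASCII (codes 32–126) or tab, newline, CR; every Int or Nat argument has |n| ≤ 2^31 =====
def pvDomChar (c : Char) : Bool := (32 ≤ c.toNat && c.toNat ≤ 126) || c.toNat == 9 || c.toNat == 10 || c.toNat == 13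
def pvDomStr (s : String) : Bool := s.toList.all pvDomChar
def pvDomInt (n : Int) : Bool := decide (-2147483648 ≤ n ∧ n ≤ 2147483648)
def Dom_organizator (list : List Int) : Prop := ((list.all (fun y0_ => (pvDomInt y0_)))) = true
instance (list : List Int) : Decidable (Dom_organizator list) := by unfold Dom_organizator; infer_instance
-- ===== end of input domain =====

-- B replaces A's quadratic positional loop (inner count scan + coupled appends) by one
-- counting-dict pass and two independent derivations (keys; items filtered by count ≥ 2).

-- ===== PORT A =====
def organizator (list : List Int) : List Int × List Int :=
  let r := list.foldl (fun (st : List Int × List Int) i =>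
    let counter : Int := list.foldl (fun c i2 => if i2 == i then c + 1 else c) 0
    if counter ≥ 2 then
      if !(st.1.contains i) then (st.1 ++ [i], st.2 ++ [i]) else st
    else if counter ≤ 1 then (st.1, st.2 ++ [i])
    else st) ([], [])
  (r.1, r.2)

-- ===== PORT B =====
def organizator_alt (list : List Int) : List Int × List Int :=
  let counts := list.foldl (fun (d : PySem.Dict Int Int) x => d.insert x (d.getD x 0 + 1)) PySem.Dict.empty
  let duplicated_itens := (counts.items.filter (fun p => p.2 ≥ 2)).map (·.1)
  let normal_list := counts.keys
  (duplicated_itens, normal_list)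

-- ===== PRECONDITION & SPEC =====
def Spec_organizator (list : List Int) (out : List Int × List Int) : Prop := out = organizator_alt list
instance (list : List Int) (out : List Int × List Int) : Decidable (Spec_organizator list out) := by unfold Spec_organizator; infer_instance

-- ===== CLAIM (what is proved, stated in full; the proofs are below) =====
def Claim_equal_organizator : Prop := ∀ (list : List Int), Dom_organizator list → Spec_organizator list (organizator list)

-- ===== LEMMAS AND PROOFS =====

-- the inner counting loop of A is list.count
theorem innerCountAux (l : List Int) (i : Int) :
    ∀ (c : Int), l.foldl (fun c i2 => if i2 == i then c + 1 else c) c = c + (l.count i : Int) := by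
  induction l with
  | nil => simp
  | cons a t ih =>
    intro c
    rw [List.foldl_cons]
    by_cases hai : a = i
    · subst hai
      rw [if_pos (by simp), ih]
      simp [List.count_cons]
      omega
    · rw [if_neg (by simp [hai]), ih]
      simp [List.count_cons]
      exact hai

theorem innerCount (l : List Int) (i : Int) :
    l.foldl (fun c i2 => if i2 == i then c + 1 else c) (0 : Int) = (l.count i : Int) := by
  simpa using innerCountAux l i 0

-- A's loop invariant: after processing prefix, state is (dedup filtered by count≥2, dedup)
theorem loopA (l : List Int) : ∀ (p q : List Int), q ++ p = l →
    p.foldl (fun (st : List Int × List Int) i =>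
        if ((l.count i : Int)) ≥ 2 then
          if !(st.1.contains i) then (st.1 ++ [i], st.2 ++ [i]) else st
        else if ((l.count i : Int)) ≤ 1 then (st.1, st.2 ++ [i])
        else st)
      ((PySem.Set.ofList q).filter (fun k => decide ((l.count k : Int) ≥ 2)), PySem.Set.ofList q)
    = ((PySem.Set.ofList l).filter (fun k => decide ((l.count k : Int) ≥ 2)), PySem.Set.ofList l) := by
  intro p
  induction p with
  | nil => intro q hq; simp at hq; simp [hq]
  | cons i p' ih =>
    intro q hq
    have hstep :
        (if ((l.count i : Int)) ≥ 2 then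
            if !(((PySem.Set.ofList q).filter (fun k => decide ((l.count k : Int) ≥ 2))).contains i)
            then ((PySem.Set.ofList q).filter (fun k => decide ((l.count k : Int) ≥ 2)) ++ [i], PySem.Set.ofList q ++ [i])
            else ((PySem.Set.ofList q).filter (fun k => decide ((l.count k : Int) ≥ 2)), PySem.Set.ofList q)
          else if ((l.count i : Int)) ≤ 1 then
            ((PySem.Set.ofList q).filter (fun k => decide ((l.count k : Int) ≥ 2)), PySem.Set.ofList q ++ [i])
          else ((PySem.Set.ofList q).filter (fun k => decide ((l.count k : Int) ≥ 2)), PySem.Set.ofList q))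
        = ((PySem.Set.ofList (q ++ [i])).filter (fun k => decide ((l.count k : Int) ≥ 2)), PySem.Set.ofList (q ++ [i])) := by
      have hofl : PySem.Set.ofList (q ++ [i]) = PySem.Set.add (PySem.Set.ofList q) i := by
        simp [PySem.Set.ofList_eq_foldl, List.foldl_append]
      by_cases h2 : ((l.count i : Int)) ≥ 2
      · by_cases hmem : i ∈ q
        · have hc2 : 2 ≤ l.count i := by exact_mod_cast h2
          have hmem' : i ∈ PySem.Set.ofList q := (PySem.Set.mem_ofList q i).mpr hmem
          have hadd : PySem.Set.add (PySem.Set.ofList q) i = PySem.Set.ofList q := by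
            simp [PySem.Set.add, PySem.Set.contains, hmem']
          simp [h2, hofl, List.mem_filter, hmem', Nat.lt_of_lt_of_le Nat.one_lt_two hc2]
        · have hc2 : 2 ≤ l.count i := by exact_mod_cast h2
          have hmem' : i ∉ PySem.Set.ofList q := fun h => hmem ((PySem.Set.mem_ofList q i).mp h)
          have hadd : PySem.Set.add (PySem.Set.ofList q) i = PySem.Set.ofList q ++ [i] := by
            simp [PySem.Set.add, PySem.Set.contains, hmem']
          simp [h2, hofl, List.filter_append, List.mem_filter, hmem, hc2]
      · -- count i ≤ 1; but i occurs at this position, so count q i = 0, i ∉ q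
        have hcnt : l.count i ≤ 1 := by omega
        have hin : l.count i = q.count i + (i :: p').count i := by
          rw [← hq, List.count_append]
        have hq0 : q.count i = 0 := by
          have : (i :: p').count i ≥ 1 := by simp
          omega
        have hmem : i ∉ q := by
          intro h
          have := List.count_pos_iff.mpr h
          omega
        have hmem' : i ∉ PySem.Set.ofList q := fun h => hmem ((PySem.Set.mem_ofList q i).mp h)
        have hadd : PySem.Set.add (PySem.Set.ofList q) i = PySem.Set.ofList q ++ [i] := by
          simp [PySem.Set.add, PySem.Set.contains, hmem']
        have h1 : ((l.count i : Int)) ≤ 1 := by exact_mod_cast hcnt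
        simp [h2, h1, hofl, hadd, List.filter_append, hcnt]
    rw [List.foldl_cons, hstep, ih (q ++ [i]) (by simpa using hq)]

theorem organizator_eq (l : List Int) :
    organizator l = ((PySem.Set.ofList l).filter (fun k => decide ((l.count k : Int) ≥ 2)), PySem.Set.ofList l) := by
  unfold organizator
  have hfun : (fun (st : List Int × List Int) i =>
      let counter : Int := l.foldl (fun c i2 => if i2 == i then c + 1 else c) 0
      if counter ≥ 2 then
        if !(st.1.contains i) then (st.1 ++ [i], st.2 ++ [i]) else st
      else if counter ≤ 1 then (st.1, st.2 ++ [i])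
      else st)
      = (fun (st : List Int × List Int) i =>
        if ((l.count i : Int)) ≥ 2 then
          if !(st.1.contains i) then (st.1 ++ [i], st.2 ++ [i]) else st
        else if ((l.count i : Int)) ≤ 1 then (st.1, st.2 ++ [i])
        else st) := by
    funext st i
    simp only [innerCount]
  simp only [hfun]
  have := loopA l l [] rfl
  simp [PySem.Set.ofList] at this ⊢
  rw [this]

theorem organizator_alt_eq (l : List Int) :
    organizator_alt l = ((PySem.Set.ofList l).filter (fun k => decide ((l.count k : Int) ≥ 2)), PySem.Set.ofList l) := by
  simp [organizator_alt, PySem.Dict.foldl_insert_getD_add_one_eq_counter,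
    PySem.Dict.items_counter, PySem.Dict.keys_counter, List.filter_map, Function.comp_def]

-- ===== VERDICT (by name: the statement is the Claim_ definition above) =====
theorem organizator_spec : Claim_equal_organizator := by
  intro l _
  show organizator l = organizator_alt l
  rw [organizator_eq, organizator_alt_eq]
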